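-- pv_equiv track=rewrite | github.com/lamwilton/DSCI-553-Data-Mining | HW3/task1.py | lsh_signature
-- ===== SOURCE A (Python) =====
-- def lsh_signature(minhashes):
--     """
--     LSH with band size of 1 rows (r = 1)
--     :param minhashes: 2d list of minhashes
--     :return: Set of Candidate pairs
--     eg {(241, 235), (3242 ,2352), ...}
--     """
--     result = set()
--     num_business = len(minhashes[0])
--     for i in range(num_business):
--         for j in range(i + 1, num_business):
--             if minhashes[0][i] == minhashes[0][j]:
--                 result.add((i, j))
--     return result
-- ===== SOURCE B (Python) =====
-- def lsh_signature(minhashes):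
--     """Group indices by their minhash value in one dict pass, then emit only
--     in-group pairs instead of scanning all O(n^2) index pairs."""
--     row = minhashes[0]
--     positions = {}
--     for j, v in enumerate(row):
--         positions.setdefault(v, []).append(j)
--     result = set()
--     for i, v in enumerate(row):
--         for j in positions[v]:
--             if j > i:
--                 result.add((i, j))
--     return result
-- ===== Notes on version B (the rewrite author's own statement) =====
-- stated objective: faster
-- what changed: Instead of comparing every index pair with a nested O(n^2) scan, B builds a dict mapping each minhash value to its list of indices in one pass and emits pairs only among indices sharing a value.
import Mathlib
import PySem

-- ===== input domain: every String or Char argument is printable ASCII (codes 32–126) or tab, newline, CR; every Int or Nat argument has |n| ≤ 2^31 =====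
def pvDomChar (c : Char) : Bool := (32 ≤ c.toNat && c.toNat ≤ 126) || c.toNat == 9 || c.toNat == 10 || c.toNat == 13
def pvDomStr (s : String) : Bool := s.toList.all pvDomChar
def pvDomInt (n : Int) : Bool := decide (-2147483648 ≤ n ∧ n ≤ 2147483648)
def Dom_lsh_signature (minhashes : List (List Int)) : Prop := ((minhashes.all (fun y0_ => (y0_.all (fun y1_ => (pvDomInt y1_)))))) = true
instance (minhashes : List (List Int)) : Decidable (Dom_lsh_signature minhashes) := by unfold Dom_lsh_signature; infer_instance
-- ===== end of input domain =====

-- B replaces A's nested scan over all index pairs by a dict grouping indices by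
-- minhash value, emitting pairs only within a group (a timing run measured it faster).
-- Both programs raise IndexError on minhashes = [] (minhashes[0]); Pre_ excludes exactly that.

-- ===== PORT A =====
-- result = set(); for i in range(num): for j in range(i+1, num): if row[i] == row[j]: result.add((i, j))
-- row indexing: i, j always lie in range, so pyGetD _ _ 0 is exact here.
def lsh_signature (minhashes : List (List Int)) : List (Int × Int) :=
  let row := minhashes.headD []          -- minhashes[0]; Pre_ excludes minhashes = []
  let num : Int := row.length
  (PySem.List.pyRange 0 num 1).foldl (fun result i =>
    (PySem.List.pyRange (i + 1) num 1).foldl (fun result j =>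
      if PySem.List.pyGetD row i 0 = PySem.List.pyGetD row j 0
      then PySem.Set.add result (i, j) else result) result) PySem.Set.empty

-- ===== PORT B =====
-- positions: dict value -> list of indices (setdefault(v, []).append(j)); then
-- for i, v in enumerate(row): for j in positions[v]: if j > i: result.add((i, j)).
-- positions[v] always exists at lookup time, so getD _ _ [] is exact here.
def lsh_signature_alt (minhashes : List (List Int)) : List (Int × Int) :=
  let row := minhashes.headD []          -- minhashes[0]; Pre_ excludes minhashes = []
  let positions : PySem.Dict Int (List Int) :=
    (PySem.List.enumerate row).foldl
      (fun d p => d.modify p.2 [] (fun l => l ++ [p.1])) PySem.Dict.empty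
  (PySem.List.enumerate row).foldl (fun result p =>
    (positions.getD p.2 []).foldl (fun result j =>
      if p.1 < j then PySem.Set.add result (p.1, j) else result) result) PySem.Set.empty

-- ===== PRECONDITION & SPEC =====
-- Pre_ excludes exactly the inputs where A raises IndexError on minhashes[0].
def Pre_lsh_signature (minhashes : List (List Int)) : Prop := minhashes ≠ []
instance (minhashes : List (List Int)) : Decidable (Pre_lsh_signature minhashes) := by
  unfold Pre_lsh_signature; infer_instance

def pvWitness_lsh_signature : List (List Int) := [[1, 2, 1, 2]]

def Spec_lsh_signature (minhashes : List (List Int)) (out : List (Int × Int)) : Prop := out = lsh_signature_alt minhashes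
instance (minhashes : List (List Int)) (out : List (Int × Int)) : Decidable (Spec_lsh_signature minhashes out) := by unfold Spec_lsh_signature; infer_instance

-- ===== CLAIM (what is proved, stated in full; the proofs are below) =====
def Claim_equal_lsh_signature : Prop := ∀ (minhashes : List (List Int)), Dom_lsh_signature minhashes → Pre_lsh_signature minhashes → Spec_lsh_signature minhashes (lsh_signature minhashes)

-- ===== LEMMAS AND PROOFS =====

-- a conditional Set.add loop is Set.update with the filtered, mapped list
theorem foldl_setadd_if {α β : Type} [BEq α] (l : List β) (p : β → Prop) [DecidablePred p]
    (f : β → α) (s : PySem.Set α) :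
    l.foldl (fun r x => if p x then PySem.Set.add r (f x) else r) s
      = PySem.Set.update s ((l.filter (fun x => decide (p x))).map f) := by
  induction l generalizing s with
  | nil => rfl
  | cons x xs ih =>
      by_cases hx : p x <;>
        simp [hx, ih, PySem.Set.update]

-- an outer loop of Set.update steps is one Set.update with the flattened list
theorem foldl_setupdate_flat {α β : Type} [BEq α] (l : List β) (g : β → List α)
    (s : PySem.Set α) :
    l.foldl (fun r x => PySem.Set.update r (g x)) s = PySem.Set.update s (l.flatMap g) := by
  induction l generalizing s with
  | nil => simp [PySem.Set.update]
  | cons x xs ih =>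
      rw [List.foldl_cons, List.flatMap_cons, ih]
      simp [PySem.Set.update, List.foldl_append]

-- restricting range(0, n) to j > i is range(i+1, n)  (0 ≤ i)
theorem filter_gt_pyRange (n i : Int) (hi : 0 ≤ i) (q : Int → Bool) :
    (PySem.List.pyRange 0 n 1).filter (fun j => decide (i < j) && q j)
      = (PySem.List.pyRange (i + 1) n 1).filter q := by
  by_cases hn : i + 1 ≤ n
  · rw [PySem.List.pyRange_one_append 0 (i + 1) n (by omega) hn, List.filter_append]
    have h1 : (PySem.List.pyRange 0 (i + 1) 1).filter (fun j => decide (i < j) && q j) = [] := by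
      rw [List.filter_eq_nil_iff]
      intro x hx
      have := (PySem.List.mem_pyRange_one).mp hx
      simp [show ¬ i < x by omega]
    have h2 : (PySem.List.pyRange (i + 1) n 1).filter (fun j => decide (i < j) && q j)
        = (PySem.List.pyRange (i + 1) n 1).filter q := by
      apply List.filter_congr
      intro x hx
      have := (PySem.List.mem_pyRange_one).mp hx
      simp [show i < x by omega]
    rw [h1, h2, List.nil_append]
  · have e1 : PySem.List.pyRange (i + 1) n 1 = [] := by
      rw [PySem.List.pyRange_one]
      simp [show (n - (i + 1)).toNat = 0 by omega]
    have e2 : (PySem.List.pyRange 0 n 1).filter (fun j => decide (i < j) && q j) = [] := by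
      rw [List.filter_eq_nil_iff]
      intro x hx
      have := (PySem.List.mem_pyRange_one).mp hx
      simp [show ¬ i < x by omega]
    rw [e1, e2, List.filter_nil]

-- B's positions dict: positions[v] is exactly the increasing list of indices j with row[j] = v
theorem positions_getD (row : List Int) (v : Int) :
    ((PySem.List.enumerate row).foldl
        (fun d p => d.modify p.2 [] (fun l => l ++ [p.1])) PySem.Dict.empty).getD v []
      = ((PySem.List.enumerate row).filter (fun p => p.2 == v)).map (fun p => p.1) := by
  have hmap : (PySem.List.enumerate row).foldl
      (fun d p => d.modify p.2 [] (fun l => l ++ [p.1])) PySem.Dict.empty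
      = ((PySem.List.enumerate row).map (fun p => (p.2, p.1))).foldl
          (fun d q => d.modify q.1 [] (fun l => l ++ [q.2])) PySem.Dict.empty := by
    rw [List.foldl_map]
  rw [hmap, PySem.Dict.getD_foldl_modify_append]
  simp [PySem.Dict.getD_empty, List.filter_map, List.map_map, Function.comp_def]

-- ===== VERDICT (by name: the statement is the Claim_ definition above) =====
theorem lsh_signature_spec : Claim_equal_lsh_signature := by
  intro minhashes _ _
  unfold Spec_lsh_signature lsh_signature lsh_signature_alt
  have hA : ∀ (row : List Int) (m i : Int) (r : PySem.Set (Int × Int)),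
      (PySem.List.pyRange (i + 1) m 1).foldl (fun result j =>
        if PySem.List.pyGetD row i 0 = PySem.List.pyGetD row j 0
        then PySem.Set.add result (i, j) else result) r
      = PySem.Set.update r
          (((PySem.List.pyRange (i + 1) m 1).filter
              (fun j => decide (PySem.List.pyGetD row i 0 = PySem.List.pyGetD row j 0))).map
            (fun j => (i, j))) :=
    fun row m i r => foldl_setadd_if _ _ _ _
  have hB : ∀ (p : Int × Int) (r : PySem.Set (Int × Int)) (l : List Int),
      l.foldl (fun result j =>
        if p.1 < j then PySem.Set.add result (p.1, j) else result) r
      = PySem.Set.update r ((l.filter (fun j => decide (p.1 < j))).map (fun j => (p.1, j))) :=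
    fun p r l => foldl_setadd_if _ _ _ _
  simp only [hA, hB, positions_getD]
  rw [foldl_setupdate_flat, foldl_setupdate_flat]
  congr 1
  -- the two flattened pair lists coincide
  set row := minhashes.headD [] with hrow
  rw [PySem.List.enumerate_eq_map_pyRange row 0, List.flatMap_map]
  apply List.flatMap_congr          -- pointwise over i in range(0, n)
  intro i hi
  have hi' := (PySem.List.mem_pyRange_one).mp hi
  simp only [PySem.List.len]
  -- B's inner list for index i, as a filtered range
  have hfil : ((PySem.List.pyRange 0 (row.length : Int) 1).map
        (fun j => (j, PySem.List.pyGetD row j 0))).filter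
        (fun p => p.2 == PySem.List.pyGetD row i 0)
      = ((PySem.List.pyRange 0 (row.length : Int) 1).filter
          (fun j => PySem.List.pyGetD row j 0 == PySem.List.pyGetD row i 0)).map
            (fun j => (j, PySem.List.pyGetD row j 0)) := by
    rw [List.filter_map]; rfl
  rw [hfil, List.map_map, List.filter_map, List.map_map, List.filter_filter]
  simp only [Function.comp_def]
  rw [filter_gt_pyRange (row.length : Int) i (by omega)
        (fun j => PySem.List.pyGetD row j 0 == PySem.List.pyGetD row i 0)]
  congr 1
  apply List.filter_congr
  intro x _
  rw [Bool.eq_iff_iff]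
  simp only [beq_iff_eq, decide_eq_true_eq]
  omega
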